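-- pv_equiv track=rewrite | github.com/LearnerSJ/smart-pdf-extractor | pdf_ingestion/pipeline/validator.py | _find_header_index
-- ===== SOURCE A (Python) =====
-- def _find_header_index(
--     headers: list[str], candidates: list[str]
-- ) -> int | None:
--     """Find the index of a header matching any of the candidates.
--
--     Tries exact match first, then substring match with word boundaries.
--     """
--     # First pass: exact match
--     for idx, header in enumerate(headers):
--         for candidate in candidates:
--             if header == candidate:
--                 return idx
--
--     # Second pass: header starts with candidate or candidate starts with header
--     for idx, header in enumerate(headers):
--         for candidate in candidates:
--             if header.startswith(candidate) or candidate.startswith(header):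
--                 return idx
--
--     return None
-- ===== SOURCE B (Python) =====
-- def _find_header_index(headers, candidates):
--     """Single pass over headers: return immediately on the first exact match
--     (set membership), while remembering the first prefix-related header."""
--     cand_set = set(candidates)
--     prefix_idx = None
--     for idx, header in enumerate(headers):
--         if header in cand_set:
--             return idx
--         if prefix_idx is None and any(
--             header.startswith(c) or c.startswith(header) for c in candidates
--         ):
--             prefix_idx = idx
--     return prefix_idx
-- ===== Notes on version B (the rewrite author's own statement) =====
-- stated objective: alternative
-- what changed: Replaces A's two sequential passes (each with an inner scan over candidates) by a single pass over headers that returns at the first set-membership exact match while carrying the first prefix-related index as an accumulator.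
import Mathlib
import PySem

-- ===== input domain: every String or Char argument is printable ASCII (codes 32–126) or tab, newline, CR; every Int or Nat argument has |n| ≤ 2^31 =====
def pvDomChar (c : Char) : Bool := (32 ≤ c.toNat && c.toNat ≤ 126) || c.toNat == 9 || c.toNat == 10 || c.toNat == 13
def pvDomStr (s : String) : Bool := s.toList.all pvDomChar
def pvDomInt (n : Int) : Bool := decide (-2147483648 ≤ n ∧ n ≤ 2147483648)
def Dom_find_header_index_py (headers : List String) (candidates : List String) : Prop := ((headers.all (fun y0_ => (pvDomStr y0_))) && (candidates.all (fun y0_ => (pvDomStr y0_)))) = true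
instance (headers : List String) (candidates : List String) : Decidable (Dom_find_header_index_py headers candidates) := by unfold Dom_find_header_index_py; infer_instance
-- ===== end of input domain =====

-- B replaces A's two sequential header passes by a single pass that returns at the first
-- set-membership exact match while carrying the first prefix-related index as an accumulator
-- (objective: alternative decomposition, same worst-case cost).


-- ===== PORT A =====
-- inner loop of A's first pass: scan candidates for an exact match
def pvInnerExact (header : String) : List String → Bool
  | [] => false
  | c :: cs => if header == c then true else pvInnerExact header cs

-- A's first pass: first index whose header equals some candidate
def pvPassExact (candidates : List String) : List String → Int → Option Int
  | [], _ => none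
  | h :: hs, i => if pvInnerExact h candidates then some i else pvPassExact candidates hs (i + 1)

-- inner loop of A's second pass: scan candidates for a bidirectional prefix match
def pvInnerPref (header : String) : List String → Bool
  | [] => false
  | c :: cs =>
      if PySem.Str.startswith header c || PySem.Str.startswith c header then true
      else pvInnerPref header cs

-- A's second pass: first index whose header is prefix-related to some candidate
def pvPassPref (candidates : List String) : List String → Int → Option Int
  | [], _ => none
  | h :: hs, i => if pvInnerPref h candidates then some i else pvPassPref candidates hs (i + 1)

def find_header_index_py (headers : List String) (candidates : List String) : Option Int :=
  match pvPassExact candidates headers 0 with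
  | some i => some i
  | none => pvPassPref candidates headers 0

-- ===== PORT B =====
-- B's single pass: return at the first set-membership exact match, remember the first
-- prefix-related index in the accumulator (Python's prefix_idx)
def pvAltLoop (candidates : List String) (candSet : PySem.Set String) :
    List String → Int → Option Int → Option Int
  | [], _, acc => acc
  | h :: hs, i, acc =>
      if PySem.Set.contains candSet h then some i
      else
        pvAltLoop candidates candSet hs (i + 1)
          (if acc.isNone &&
              candidates.any (fun c => PySem.Str.startswith h c || PySem.Str.startswith c h)
           then some i else acc)

def find_header_index_py_alt (headers : List String) (candidates : List String) : Option Int :=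
  pvAltLoop candidates (PySem.Set.ofList candidates) headers 0 none

-- ===== PRECONDITION & SPEC =====
def Spec_find_header_index_py (headers : List String) (candidates : List String) (out : Option Int) : Prop := out = find_header_index_py_alt headers candidates
instance (headers : List String) (candidates : List String) (out : Option Int) : Decidable (Spec_find_header_index_py headers candidates out) := by unfold Spec_find_header_index_py; infer_instance

-- ===== CLAIM (what is proved, stated in full; the proofs are below) =====
def Claim_equal_find_header_index_py : Prop := ∀ (headers : List String) (candidates : List String), Dom_find_header_index_py headers candidates → Spec_find_header_index_py headers candidates (find_header_index_py headers candidates)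

-- ===== LEMMAS AND PROOFS =====
theorem pvInnerExact_eq_contains (h : String) (cs : List String) :
    pvInnerExact h cs = cs.contains h := by
  induction cs with
  | nil => rfl
  | cons c cs ih =>
      by_cases hc : h = c
      · subst hc; simp [pvInnerExact]
      · simp [pvInnerExact, hc, ih]

theorem pvSet_contains_ofList (h : String) (cs : List String) :
    PySem.Set.contains (PySem.Set.ofList cs) h = cs.contains h := by
  simp [PySem.Set.contains_eq_listContains]

theorem pvInnerPref_eq_any (h : String) (cs : List String) :
    pvInnerPref h cs =
      cs.any (fun c => PySem.Str.startswith h c || PySem.Str.startswith c h) := by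
  induction cs with
  | nil => rfl
  | cons c cs ih =>
      simp only [pvInnerPref, List.any_cons, ← ih]
      by_cases hc : (PySem.Str.startswith h c || PySem.Str.startswith c h) = true <;>
        simp

theorem pvAltLoop_eq (cands : List String) (hs : List String) :
    ∀ (i : Int) (acc : Option Int),
      pvAltLoop cands (PySem.Set.ofList cands) hs i acc =
        match pvPassExact cands hs i with
        | some j => some j
        | none =>
            match acc with
            | some p => some p
            | none => pvPassPref cands hs i := by
  induction hs with
  | nil => intro i acc; cases acc <;> rfl
  | cons h hs ih =>
      intro i acc
      simp only [pvAltLoop, pvPassExact, pvPassPref, pvSet_contains_ofList,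
        ← pvInnerExact_eq_contains, ← pvInnerPref_eq_any]
      by_cases he : pvInnerExact h cands = true
      · simp [he]
      · have he' : pvInnerExact h cands = false := by
          cases hb : pvInnerExact h cands
          · rfl
          · exact absurd hb he
        cases acc with
        | some p => simp [he', ih]
        | none =>
            by_cases hp : pvInnerPref h cands = true
            · simp [he', hp, ih]
            · have hp' : pvInnerPref h cands = false := by
                cases hb : pvInnerPref h cands
                · rfl
                · exact absurd hb hp
              simp [he', hp', ih]

-- ===== VERDICT (by name: the statement is the Claim_ definition above) =====
theorem find_header_index_py_spec : Claim_equal_find_header_index_py := by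
  intro headers candidates _
  unfold Spec_find_header_index_py find_header_index_py find_header_index_py_alt
  rw [pvAltLoop_eq]
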